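-- pv_equiv track=rewrite | github.com/alexandraback/datacollection | solutions_5631572862566400_1/Python/osoken/solver.py | get_sinkord
-- ===== SOURCE A (Python) =====
-- def get_sinkord(p, r, d, flg=True):
--     if flg:
--         if p[0] not in r:
--             return get_sinkord(p, r, d, False)
--         best = d
--         for n in r[p[0]]:
--             cand = get_sinkord((n, p[1]), r, d+1, True)
--             if best < cand:
--                 best = cand
--         return best
--     else:
--         if p[1] not in r:
--             return d
--         best = d
--         for n in r[p[1]]:
--             cand = get_sinkord((p[0], n), r, d+1, False)
--             if best < cand:
--                 best = cand
--         return best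
-- ===== SOURCE B (Python) =====
-- def _chain_height(y, r):
--     # longest-chain height below y in the relation graph (0 if y is not a key)
--     if y not in r:
--         return 0
--     return max([1 + _chain_height(n, r) for n in r[y]] or [0])
--
--
-- def _phase1_height(x, y, r):
--     # phase-1 height below x; a non-key leaf hands over to the phase-2 chain from y
--     if x not in r:
--         return _chain_height(y, r)
--     return max([1 + _phase1_height(n, y, r) for n in r[x]] or [0])
--
--
-- def get_sinkord(p, r, d, flg=True):
--     if flg:
--         return d + _phase1_height(p[0], p[1], r)
--     return d + _chain_height(p[1], r)
-- ===== Notes on version B (the rewrite author's own statement) =====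
-- stated objective: simpler
-- what changed: B replaces A's single mode-flag recursion that threads the depth accumulator d through every call by two pure recursive height functions (phase-1 height handing over to the phase-2 chain height at non-key leaves, each a max over a comprehension), combined once as d + height.
-- outside the precondition, e.g. on get_sinkord((5,), {5: []}, 0, True): A returns 0, B raises IndexError
import Mathlib
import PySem

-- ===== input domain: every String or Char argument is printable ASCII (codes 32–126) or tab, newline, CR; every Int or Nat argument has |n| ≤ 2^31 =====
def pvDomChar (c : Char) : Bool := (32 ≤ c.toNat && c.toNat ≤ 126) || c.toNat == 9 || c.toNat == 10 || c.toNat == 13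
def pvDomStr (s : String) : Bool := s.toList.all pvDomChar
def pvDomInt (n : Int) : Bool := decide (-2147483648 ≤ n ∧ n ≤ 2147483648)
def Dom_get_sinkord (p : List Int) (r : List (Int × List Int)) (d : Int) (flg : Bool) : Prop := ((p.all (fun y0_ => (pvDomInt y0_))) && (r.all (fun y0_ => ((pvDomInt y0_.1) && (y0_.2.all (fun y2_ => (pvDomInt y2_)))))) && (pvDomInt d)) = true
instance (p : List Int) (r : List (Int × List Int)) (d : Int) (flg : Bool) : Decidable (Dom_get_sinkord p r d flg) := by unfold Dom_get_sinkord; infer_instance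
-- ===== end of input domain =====

-- B replaces A's single mode-flag recursion that threads the depth accumulator d by two pure
-- height functions combined once as d + height (objective: simpler decomposition, not faster).
-- Both recursions are ported with an explicit fuel (Python has no fuel; the fuel only decides
-- the inputs outside Pre_, where Python's recursion does not terminate).

-- ===== PORT A =====
-- literal transliteration of A's recursion; p survives only as its two used components a = p[0], b = p[1]
def pvGoA (r : List (Int × List Int)) : Nat → Int → Int → Int → Bool → Int
  | 0, _, _, d, _ => d
  | f + 1, a, b, d, true =>
    match (PySem.Dict.mk r).get? a with
    | none => pvGoA r f a b d false
    | some ns =>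
      ns.foldl (fun best n =>
        let cand := pvGoA r f n b (d + 1) true
        if best < cand then cand else best) d
  | f + 1, a, b, d, false =>
    match (PySem.Dict.mk r).get? b with
    | none => d
    | some ns =>
      ns.foldl (fun best n =>
        let cand := pvGoA r f a n (d + 1) false
        if best < cand then cand else best) d

def get_sinkord (p : List Int) (r : List (Int × List Int)) (d : Int) (flg : Bool) : Int :=
  pvGoA r (2 * r.length + 4) ((PySem.List.pyGet? p 0).getD 0) ((PySem.List.pyGet? p 1).getD 0) d flg

-- ===== PORT B =====
-- _chain_height(y, r): max([1 + _chain_height(n, r) for n in r[y]] or [0])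
def pvChainH (r : List (Int × List Int)) : Nat → Int → Int
  | 0, _ => 0
  | f + 1, y =>
    match (PySem.Dict.mk r).get? y with
    | none => 0
    | some ns => (PySem.List.max? (ns.map (fun n => 1 + pvChainH r f n)) (fun v => v)).getD 0

-- _phase1_height(x, y, r)
def pvPhaseH (r : List (Int × List Int)) : Nat → Int → Int → Int
  | 0, _, _ => 0
  | f + 1, x, y =>
    match (PySem.Dict.mk r).get? x with
    | none => pvChainH r f y
    | some ns => (PySem.List.max? (ns.map (fun n => 1 + pvPhaseH r f n y)) (fun v => v)).getD 0

def get_sinkord_alt (p : List Int) (r : List (Int × List Int)) (d : Int) (flg : Bool) : Int :=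
  if flg then
    d + pvPhaseH r (2 * r.length + 4) ((PySem.List.pyGet? p 0).getD 0) ((PySem.List.pyGet? p 1).getD 0)
  else
    d + pvChainH r (2 * r.length + 4) ((PySem.List.pyGet? p 1).getD 0)

-- ===== PRECONDITION & SPEC =====
-- closed-form graph helpers for Pre_: reachability in the relation graph r
def pvAdj (r : List (Int × List Int)) (x : Int) : List Int := ((PySem.Dict.mk r).get? x).getD []
def pvGrow (r : List (Int × List Int)) (S : List Int) : List Int := (S ++ S.flatMap (pvAdj r)).dedup
def pvIterGrow (r : List (Int × List Int)) : Nat → List Int → List Int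
  | 0, S => S
  | k + 1, S => pvIterGrow r k (pvGrow r S)
def pvReach (r : List (Int × List Int)) (S : List Int) : List Int :=
  pvIterGrow r (r.length + (r.flatMap (fun kv => kv.2)).length + 1) S
def pvCycleFree (r : List (Int × List Int)) (s : Int) : Bool :=
  (pvReach r [s]).all (fun k => !((pvReach r (pvAdj r k)).contains k))
def pvLeafReach (r : List (Int × List Int)) (s : Int) : Bool :=
  (pvReach r [s]).any (fun x => ((PySem.Dict.mk r).get? x).isNone)

-- Pre_ excludes p with fewer than two elements (B reads p[1] up front and raises IndexError
-- where A can return without ever touching p[1]) and the inputs on which Python's recursion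
-- does not terminate — a cycle reachable from the start node(s) actually visited
-- (A raises RecursionError there).
def Pre_get_sinkord (p : List Int) (r : List (Int × List Int)) (d : Int) (flg : Bool) : Prop :=
  2 ≤ p.length ∧
  (flg = true → pvCycleFree r (p.getD 0 0) = true ∧
    (pvLeafReach r (p.getD 0 0) = true → pvCycleFree r (p.getD 1 0) = true)) ∧
  (flg = false → pvCycleFree r (p.getD 1 0) = true)
instance (p : List Int) (r : List (Int × List Int)) (d : Int) (flg : Bool) : Decidable (Pre_get_sinkord p r d flg) := by unfold Pre_get_sinkord; infer_instance

def pvWitness_get_sinkord : List Int × (List (Int × List Int)) × Int × Bool :=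
  ([1, 2], [(1, [2]), (3, [])], 0, true)

def Spec_get_sinkord (p : List Int) (r : List (Int × List Int)) (d : Int) (flg : Bool) (out : Int) : Prop := out = get_sinkord_alt p r d flg
instance (p : List Int) (r : List (Int × List Int)) (d : Int) (flg : Bool) (out : Int) : Decidable (Spec_get_sinkord p r d flg out) := by unfold Spec_get_sinkord; infer_instance

-- ===== CLAIM (what is proved, stated in full; the proofs are below) =====
def Claim_equal_get_sinkord : Prop := ∀ (p : List Int) (r : List (Int × List Int)) (d : Int) (flg : Bool), Dom_get_sinkord p r d flg → Pre_get_sinkord p r d flg → Spec_get_sinkord p r d flg (get_sinkord p r d flg)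

-- ===== LEMMAS AND PROOFS =====

-- definitional step lemmas for the three fueled recursions
theorem pvGoA_false_none (r : List (Int × List Int)) (f : Nat) (a b d : Int)
    (h : (PySem.Dict.mk r).get? b = none) : pvGoA r (f + 1) a b d false = d := by
  simp only [pvGoA, h]

theorem pvGoA_false_some (r : List (Int × List Int)) (f : Nat) (a b d : Int) (ns : List Int)
    (h : (PySem.Dict.mk r).get? b = some ns) :
    pvGoA r (f + 1) a b d false
      = ns.foldl (fun best n =>
          if best < pvGoA r f a n (d + 1) false then pvGoA r f a n (d + 1) false else best) d := by
  simp only [pvGoA, h]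

theorem pvGoA_true_none (r : List (Int × List Int)) (f : Nat) (a b d : Int)
    (h : (PySem.Dict.mk r).get? a = none) : pvGoA r (f + 1) a b d true = pvGoA r f a b d false := by
  simp only [pvGoA, h]

theorem pvGoA_true_some (r : List (Int × List Int)) (f : Nat) (a b d : Int) (ns : List Int)
    (h : (PySem.Dict.mk r).get? a = some ns) :
    pvGoA r (f + 1) a b d true
      = ns.foldl (fun best n =>
          if best < pvGoA r f n b (d + 1) true then pvGoA r f n b (d + 1) true else best) d := by
  simp only [pvGoA, h]

theorem pvChainH_succ_none (r : List (Int × List Int)) (f : Nat) (y : Int)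
    (h : (PySem.Dict.mk r).get? y = none) : pvChainH r (f + 1) y = 0 := by
  simp only [pvChainH, h]

theorem pvChainH_succ_some (r : List (Int × List Int)) (f : Nat) (y : Int) (ns : List Int)
    (h : (PySem.Dict.mk r).get? y = some ns) :
    pvChainH r (f + 1) y
      = (PySem.List.max? (ns.map (fun n => 1 + pvChainH r f n)) (fun v => v)).getD 0 := by
  simp only [pvChainH, h]

theorem pvPhaseH_succ_none (r : List (Int × List Int)) (f : Nat) (x y : Int)
    (h : (PySem.Dict.mk r).get? x = none) : pvPhaseH r (f + 1) x y = pvChainH r f y := by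
  simp only [pvPhaseH, h]

theorem pvPhaseH_succ_some (r : List (Int × List Int)) (f : Nat) (x y : Int) (ns : List Int)
    (h : (PySem.Dict.mk r).get? x = some ns) :
    pvPhaseH r (f + 1) x y
      = (PySem.List.max? (ns.map (fun n => 1 + pvPhaseH r f n y)) (fun v => v)).getD 0 := by
  simp only [pvPhaseH, h]

-- A's running-max loop over candidates d + 1 + v n, started at d + c, is d plus a running max
theorem pv_foldl_best_aux (v : Int → Int) (ns : List Int) (d : Int) :
    ∀ c : Int, ns.foldl (fun best n => if best < d + 1 + v n then d + 1 + v n else best) (d + c)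
      = d + ns.foldl (fun acc n => max acc (1 + v n)) c := by
  induction ns with
  | nil => intro c; rfl
  | cons x t ih =>
    intro c
    simp only [List.foldl_cons]
    have h1 : (if d + c < d + 1 + v x then d + 1 + v x else d + c) = d + max c (1 + v x) := by
      rcases le_total (1 + v x) c with h | h
      · rw [max_eq_left h, if_neg (by omega)]
      · rw [max_eq_right h]; split_ifs <;> omega
    rw [h1, ih]

theorem pv_foldl_best (v : Int → Int) (ns : List Int) (d : Int) :
    ns.foldl (fun best n => if best < d + 1 + v n then d + 1 + v n else best) d
      = d + ns.foldl (fun acc n => max acc (1 + v n)) 0 := by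
  have h := pv_foldl_best_aux v ns d 0
  rw [show d + (0 : Int) = d from by ring] at h
  exact h

theorem pv_le_foldl_max (l : List Int) : ∀ c : Int, c ≤ l.foldl max c := by
  induction l with
  | nil => intro c; exact le_refl c
  | cons x t ih => intro c; exact le_trans (le_max_left c x) (ih (max c x))

-- Python's max(vals or [0]) equals the running max from 0 when all values are nonnegative
theorem pv_max_getD (vals : List Int) (h : ∀ v ∈ vals, 0 ≤ v) :
    (PySem.List.max? vals (fun v => v)).getD 0 = vals.foldl max 0 := by
  cases vals with
  | nil => rfl
  | cons x t =>
    rw [PySem.List.max?_id_cons]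
    simp only [Option.getD_some, List.foldl_cons]
    rw [max_eq_right (h x List.mem_cons_self)]

theorem pvChainH_nonneg (r : List (Int × List Int)) : ∀ (f : Nat) (y : Int), 0 ≤ pvChainH r f y := by
  intro f
  induction f with
  | zero => intro y; simp [pvChainH]
  | succ f ih =>
    intro y
    cases h : (PySem.Dict.mk r).get? y with
    | none => rw [pvChainH_succ_none r f y h]
    | some ns =>
      rw [pvChainH_succ_some r f y ns h]
      rw [pv_max_getD _ (by
        intro v hv
        rcases List.mem_map.mp hv with ⟨n, _, rfl⟩
        have := ih n; omega)]
      exact pv_le_foldl_max _ 0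

theorem pvPhaseH_nonneg (r : List (Int × List Int)) : ∀ (f : Nat) (x y : Int), 0 ≤ pvPhaseH r f x y := by
  intro f
  induction f with
  | zero => intro x y; simp [pvPhaseH]
  | succ f ih =>
    intro x y
    cases h : (PySem.Dict.mk r).get? x with
    | none => rw [pvPhaseH_succ_none r f x y h]; exact pvChainH_nonneg r f y
    | some ns =>
      rw [pvPhaseH_succ_some r f x y ns h]
      rw [pv_max_getD _ (by
        intro v hv
        rcases List.mem_map.mp hv with ⟨n, _, rfl⟩
        have := ih n y; omega)]
      exact pv_le_foldl_max _ 0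

-- phase 2: A's flag-false recursion is d plus B's chain height, at every fuel
theorem pvGoA_false_eq (r : List (Int × List Int)) : ∀ (f : Nat) (a b d : Int),
    pvGoA r f a b d false = d + pvChainH r f b := by
  intro f
  induction f with
  | zero => intro a b d; simp [pvGoA, pvChainH]
  | succ f ih =>
    intro a b d
    cases h : (PySem.Dict.mk r).get? b with
    | none => rw [pvGoA_false_none r f a b d h, pvChainH_succ_none r f b h]; ring
    | some ns =>
      rw [pvGoA_false_some r f a b d ns h, pvChainH_succ_some r f b ns h]
      simp only [ih]
      rw [pv_foldl_best (fun n => pvChainH r f n) ns d]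
      rw [pv_max_getD _ (by
        intro v hv
        rcases List.mem_map.mp hv with ⟨n, _, rfl⟩
        have := pvChainH_nonneg r f n; omega)]
      rw [List.foldl_map]

-- phase 1: A's flag-true recursion is d plus B's phase-1 height, at every fuel
theorem pvGoA_true_eq (r : List (Int × List Int)) : ∀ (f : Nat) (a b d : Int),
    pvGoA r f a b d true = d + pvPhaseH r f a b := by
  intro f
  induction f with
  | zero => intro a b d; simp [pvGoA, pvPhaseH]
  | succ f ih =>
    intro a b d
    cases h : (PySem.Dict.mk r).get? a with
    | none => rw [pvGoA_true_none r f a b d h, pvPhaseH_succ_none r f a b h]; exact pvGoA_false_eq r f a b d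
    | some ns =>
      rw [pvGoA_true_some r f a b d ns h, pvPhaseH_succ_some r f a b ns h]
      simp only [ih]
      rw [pv_foldl_best (fun n => pvPhaseH r f n b) ns d]
      rw [pv_max_getD _ (by
        intro v hv
        rcases List.mem_map.mp hv with ⟨n, _, rfl⟩
        have := pvPhaseH_nonneg r f n b; omega)]
      rw [List.foldl_map]

-- ===== VERDICT (by name: the statement is the Claim_ definition above) =====
theorem get_sinkord_spec : Claim_equal_get_sinkord := by
  intro p r d flg _hDom _hPre
  unfold Spec_get_sinkord get_sinkord get_sinkord_alt
  cases flg with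
  | true => rw [if_pos rfl]; exact pvGoA_true_eq r _ _ _ d
  | false => rw [if_neg (by simp)]; exact pvGoA_false_eq r _ _ _ d
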